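-- pv_equiv track=rewrite | github.com/hk-bae/coding-test | programmers/17673.py | solution
-- ===== SOURCE A (Python) =====
-- def getPlayTime(start,end) :
--     h1,m1 = start.split(":")
--     h2,m2 = end.split(":")
--
--     return (int(h2) - int(h1)) * 60 + int(m2)  - int(m1)
--
-- def solution(m, musicinfos):
--
--     new_info = []
--     m = m.replace('C#','1')
--     m = m.replace('D#','2')
--     m = m.replace('F#','3')
--     m = m.replace('G#','4')
--     m = m.replace('A#','5')
--
--     k = 0 # 몇번째 입력 값인지 저장
--     for info in musicinfos :
--
--         info_list = list(info.split(","))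
--
--         info_list[3] = info_list[3].replace('C#','1')
--         info_list[3] = info_list[3].replace('D#','2')
--         info_list[3] = info_list[3].replace('F#','3')
--         info_list[3] = info_list[3].replace('G#','4')
--         info_list[3] = info_list[3].replace('A#','5')
--
--         length = len(info_list[3]) # 음악 전체 길이
--
--         play_time = getPlayTime(info_list[0],info_list[1]) # 재생 길이
--         music = '' # 네오가 실제 들은 악보
--
--         if play_time <= length :
--             music = info_list[3][:play_time]
--         else :
--             q = (play_time // length)
--             r = (play_time % length)
--             music = info_list[3] * q + info_list[3][:r]
--
--
--         if m in music : # 네오가 들은 부분이 포함된 경우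
--             new_info.append((play_time,k,info_list[2]))
--             k += 1
--
--
--     new_info.sort(key = lambda x : (-x[0],x[1]))
--
--     if new_info : answer = new_info[0][2]
--     else : answer = "(None)"
--
--     return answer
-- ===== SOURCE B (Python) =====
-- def toMinutes(t):
--     h, mn = t.split(":")
--     return int(h) * 60 + int(mn)
--
-- def normalize(s):
--     for sharp, flat in (("C#", "1"), ("D#", "2"), ("F#", "3"), ("G#", "4"), ("A#", "5")):
--         s = s.replace(sharp, flat)
--     return s
--
-- def solution(m, musicinfos):
--     m = normalize(m)
--     best_time = None
--     answer = "(None)"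
--     for info in musicinfos:
--         start, end, title, notes = info.split(",")[:4]
--         notes = normalize(notes)
--         play_time = toMinutes(end) - toMinutes(start)
--         length = len(notes)
--         if play_time <= length:
--             played = notes[:play_time]
--         else:
--             played = notes * (play_time // length) + notes[:play_time % length]
--         if m in played and (best_time is None or play_time > best_time):
--             best_time = play_time
--             answer = title
--     return answer
-- ===== Notes on version B (the rewrite author's own statement) =====
-- stated objective: simpler
-- what changed: B replaces A's collect-matches-with-a-running-index-then-sort-by-(-playtime,index) selection by a single pass that keeps the best (play_time, title) so far with a strict '>' comparison, dropping the list, the k counter and the sort; parsing is decomposed differently (unpack the four fields, minutes-since-midnight helper, one normalization loop over the five sharp notes).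
import Mathlib
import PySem

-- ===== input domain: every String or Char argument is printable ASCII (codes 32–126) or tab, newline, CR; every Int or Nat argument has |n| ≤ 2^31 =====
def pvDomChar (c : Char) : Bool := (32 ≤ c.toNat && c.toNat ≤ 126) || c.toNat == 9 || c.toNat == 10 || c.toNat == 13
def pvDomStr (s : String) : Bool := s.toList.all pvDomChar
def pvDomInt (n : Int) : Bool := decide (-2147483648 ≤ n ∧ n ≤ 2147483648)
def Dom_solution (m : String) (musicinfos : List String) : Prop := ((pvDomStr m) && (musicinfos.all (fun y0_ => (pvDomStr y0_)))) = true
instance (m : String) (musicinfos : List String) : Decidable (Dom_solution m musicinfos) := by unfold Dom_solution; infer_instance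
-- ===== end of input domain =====

-- B is a simpler decomposition: one pass keeping the best (time, title) so far instead of
-- collecting matches with a running index and sorting by (-playtime, index) at the end.

-- Python's  s * n  (n ≤ 0 gives ''); shared primitive used by both Pythons' melody building
def pvRepeat (cs : List Char) (n : Int) : List Char := (List.replicate n.toNat cs).flatten

-- ===== PORT A =====
def pvReplA (cs : List Char) : List Char :=
  PySem.Chars.replace (PySem.Chars.replace (PySem.Chars.replace (PySem.Chars.replace
    (PySem.Chars.replace cs ['C','#'] ['1']) ['D','#'] ['2']) ['F','#'] ['3']) ['G','#'] ['4']) ['A','#'] ['5']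

def getPlayTime? (s e : List Char) : Option Int :=
  match PySem.Chars.splitOn s [':'] with
  | [h1, m1] =>
    match PySem.Chars.splitOn e [':'] with
    | [h2, m2] =>
      match PySem.Int.ofChars? h2, PySem.Int.ofChars? h1, PySem.Int.ofChars? m2, PySem.Int.ofChars? m1 with
      | some a, some b, some c, some d => some ((a - b) * 60 + c - d)
      | _, _, _, _ => none
    | _ => none
  | _ => none

def pvStepA (mm : List Char) (st : List (Int × Int × List Char) × Int) (info : String) :
    Option (List (Int × Int × List Char) × Int) :=
  let ps := PySem.Chars.splitOn info.toList [',']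
  if h : 3 < ps.length then
    let notes := pvReplA (ps[3]'h)
    let length : Int := notes.length
    match getPlayTime? (ps[0]'(by omega)) (ps[1]'(by omega)) with
    | none => none
    | some pt =>
      let music? : Option (List Char) :=
        if pt ≤ length then some (PySem.List.slice notes none (some pt))
        else
          match PySem.Int.floordiv? pt length, PySem.Int.mod? pt length with
          | some q, some r => some (pvRepeat notes q ++ PySem.List.slice notes none (some r))
          | _, _ => none
      match music? with
      | none => none
      | some music =>
        if PySem.Chars.isIn mm music then some (st.1 ++ [(pt, st.2, ps[2]'(by omega))], st.2 + 1)
        else some st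
  else none

def solution (m : String) (musicinfos : List String) : String :=
  match musicinfos.foldl (fun acc info => acc.bind (fun st => pvStepA (pvReplA m.toList) st info)) (some ([], 0)) with
  | none => ""  -- unreachable under Pre_: Python raised
  | some (newInfo, _) =>
    match PySem.List.sorted2 newInfo (fun x => -x.1) (fun x => x.2.1) with
    | [] => "(None)"
    | x :: _ => String.ofList x.2.2

-- ===== PORT B =====
def pvNormPairs : List (List Char × List Char) :=
  [(['C','#'], ['1']), (['D','#'], ['2']), (['F','#'], ['3']), (['G','#'], ['4']), (['A','#'], ['5'])]

def pvNormB (cs : List Char) : List Char :=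
  pvNormPairs.foldl (fun s p => PySem.Chars.replace s p.1 p.2) cs

def toMinutes? (t : List Char) : Option Int :=
  match PySem.Chars.splitOn t [':'] with
  | [h, mn] =>
    match PySem.Int.ofChars? h, PySem.Int.ofChars? mn with
    | some a, some b => some (a * 60 + b)
    | _, _ => none
  | _ => none

def pvStepB (mm : List Char) (st : Option Int × String) (info : String) : Option (Option Int × String) :=
  match PySem.Chars.splitOn info.toList [','] with
  | start :: stop :: title :: notes0 :: _ =>
    let notes := pvNormB notes0
    match toMinutes? stop, toMinutes? start with
    | some te, some ts =>
      let pt := te - ts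
      let len : Int := notes.length
      match (if pt ≤ len then some (PySem.List.slice notes none (some pt))
             else
               match PySem.Int.divmod? pt len with
               | some qr => some (pvRepeat notes qr.1 ++ PySem.List.slice notes none (some qr.2))
               | none => none) with
      | some played =>
        let better : Bool := match st.1 with | none => true | some b => decide (b < pt)
        if PySem.Chars.isIn mm played && better then some (some pt, String.ofList title) else some st
      | none => none
    | _, _ => none
  | _ => none

def solution_alt (m : String) (musicinfos : List String) : String :=
  match musicinfos.foldl (fun acc info => acc.bind (fun st => pvStepB (pvNormB m.toList) st info)) (some (none, "(None)")) with
  | none => "(None)"  -- unreachable under Pre_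
  | some st => st.2

-- ===== PRECONDITION & SPEC =====
-- Pre_ excludes exactly the inputs where the Python A raises: an info line without 4
-- comma-fields, a time that is not "int:int", or an empty normalised melody with a
-- positive play time (ZeroDivisionError).
def pvInfoOK (info : String) : Bool :=
  match PySem.Chars.splitOn info.toList [','] with
  | start :: stop :: _ :: notes0 :: _ =>
    match PySem.Chars.splitOn start [':'], PySem.Chars.splitOn stop [':'] with
    | [h1, m1], [h2, m2] =>
      match PySem.Int.ofChars? h1, PySem.Int.ofChars? m1, PySem.Int.ofChars? h2, PySem.Int.ofChars? m2 with
      | some a, some b, some c, some d =>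
        !(pvNormB notes0).isEmpty || decide ((c - a) * 60 + d - b ≤ 0)
      | _, _, _, _ => false
    | _, _ => false
  | _ => false

def Pre_solution (m : String) (musicinfos : List String) : Prop :=
  ∀ info ∈ musicinfos, pvInfoOK info = true
instance (m : String) (musicinfos : List String) : Decidable (Pre_solution m musicinfos) := by
  unfold Pre_solution; infer_instance

def pvWitness_solution : String × List String :=
  ("CC#", ["12:00,12:04,WORLD,C#CDD", "12:00,12:14,HELLO,CC#CC#"])

def Spec_solution (m : String) (musicinfos : List String) (out : String) : Prop := out = solution_alt m musicinfos
instance (m : String) (musicinfos : List String) (out : String) : Decidable (Spec_solution m musicinfos out) := by unfold Spec_solution; infer_instance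

-- ===== CLAIM (what is proved, stated in full; the proofs are below) =====
def Claim_equal_solution : Prop := ∀ (m : String) (musicinfos : List String), Dom_solution m musicinfos → Pre_solution m musicinfos → Spec_solution m musicinfos (solution m musicinfos)

-- ===== LEMMAS AND PROOFS =====

theorem pvNormB_eq (cs : List Char) : pvNormB cs = pvReplA cs := rfl

-- the lexicographic "comes strictly before" test that PySem.List.sorted2 uses
def pvBefore (a b : Int × Int × List Char) : Bool :=
  decide (b.1 < a.1) || (!decide (a.1 < b.1) && decide (a.2.1 < b.2.1))

theorem sorted2_append_singleton (l : List (Int × Int × List Char)) (x : Int × Int × List Char) :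
    PySem.List.sorted2 (l ++ [x]) (fun y => -y.1) (fun y => y.2.1) =
      PySem.List.insertBy pvBefore x (PySem.List.sorted2 l (fun y => -y.1) (fun y => y.2.1)) := by
  simp [PySem.List.sorted2, List.foldl_append]
  rfl

-- joint description of one loop iteration of both ports on a well-formed info line
theorem step_agree (mm : List Char) (info : String) (h : pvInfoOK info = true)
    (l : List (Int × Int × List Char)) (k : Int) (st : Option Int × String) :
    ∃ (pt : Int) (title : List Char) (matched : Bool),
      pvStepA mm (l, k) info = some (if matched then (l ++ [(pt, k, title)], k + 1) else (l, k)) ∧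
      pvStepB mm st info =
        some (if matched && (match st.1 with | none => true | some b => decide (b < pt))
              then (some pt, String.ofList title) else st) := by
  unfold pvInfoOK at h
  split at h
  all_goals try exact absurd h Bool.false_ne_true
  rename_i e0 e1 e2 e3 tail hps
  split at h
  all_goals try exact absurd h Bool.false_ne_true
  rename_i h1c m1c h2c m2c hs1 hs2
  split at h
  all_goals try exact absurd h Bool.false_ne_true
  rename_i a b c d ha hb hc hd
  have hgp : getPlayTime? e0 e1 = some ((c - a) * 60 + d - b) := by
    simp [getPlayTime?, hs1, hs2, ha, hb, hc, hd]
  have ht1 : toMinutes? e1 = some (c * 60 + d) := by simp [toMinutes?, hs2, hc, hd]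
  have ht0 : toMinutes? e0 = some (a * 60 + b) := by simp [toMinutes?, hs1, ha, hb]
  by_cases hle : (c - a) * 60 + d - b ≤ ((pvReplA e3).length : Int)
  · refine ⟨(c - a) * 60 + d - b, e2,
      PySem.Chars.isIn mm (PySem.List.slice (pvReplA e3) none (some ((c - a) * 60 + d - b))), ?_, ?_⟩
    · simp [pvStepA, hps, hgp, hle, apply_ite]
    · simp [pvStepB, hps, ht0, ht1, pvNormB_eq, apply_ite,
        show (c - a) * 60 + d ≤ ((pvReplA e3).length : Int) + b from by omega,
        show c * 60 + d - (a * 60 + b) = (c - a) * 60 + d - b from by ring]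
      split_ifs <;> simp_all
  · have hpos : (0:Int) < (c - a) * 60 + d - b := by
      have := (pvReplA e3).length; omega
    have hne : ((pvReplA e3).length : Int) ≠ 0 := by
      intro hn
      have hnil : pvReplA e3 = [] := List.length_eq_zero_iff.mp (by exact_mod_cast hn)
      rcases (by simpa using h : ¬ (pvNormB e3).isEmpty = true ∨ (c - a) * 60 + d - b ≤ 0) with h' | h'
      · rw [pvNormB_eq] at h'; simp [hnil] at h'
      · omega
    refine ⟨(c - a) * 60 + d - b, e2,
      PySem.Chars.isIn mm (pvRepeat (pvReplA e3) (((c - a) * 60 + d - b).fdiv (pvReplA e3).length) ++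
        PySem.List.slice (pvReplA e3) none (some (((c - a) * 60 + d - b).fmod (pvReplA e3).length))), ?_, ?_⟩
    · simp [pvStepA, hps, hgp, hle, PySem.Int.floordiv?, PySem.Int.mod?, apply_ite]
      split_ifs <;> simp_all
    · simp [pvStepB, hps, ht0, ht1, pvNormB_eq, PySem.Int.divmod?, apply_ite,
        show ¬ ((c - a) * 60 + d ≤ ((pvReplA e3).length : Int) + b) from by omega,
        show c * 60 + d - (a * 60 + b) = (c - a) * 60 + d - b from by ring]
      split_ifs <;> simp_all

-- the loop invariant tying A's accumulated match list to B's running best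
def pvInv (l : List (Int × Int × List Char)) (k : Int) (st : Option Int × String) : Prop :=
  (∀ p ∈ l, p.2.1 < k) ∧
  (match (PySem.List.sorted2 l (fun y => -y.1) (fun y => y.2.1)).head? with
   | none => st = (none, "(None)")
   | some x => st.1 = some x.1 ∧ st.2 = String.ofList x.2.2)

theorem inv_step (mm : List Char) (info : String) (h : pvInfoOK info = true)
    (l : List (Int × Int × List Char)) (k : Int) (st : Option Int × String)
    (hinv : pvInv l k st) :
    ∃ l' k' st', pvStepA mm (l, k) info = some (l', k') ∧ pvStepB mm st info = some st' ∧
      pvInv l' k' st' := by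
  obtain ⟨pt, title, matched, hA, hB⟩ := step_agree mm info h l k st
  obtain ⟨hbound, hmatch⟩ := hinv
  cases matched with
  | false =>
    exact ⟨l, k, st, by simpa using hA, by simpa using hB, hbound, hmatch⟩
  | true =>
    have hbound' : ∀ p ∈ l ++ [((pt, k, title) : Int × Int × List Char)], p.2.1 < k + 1 := by
      intro p hp
      rcases List.mem_append.mp hp with hp | hp
      · have := hbound p hp; omega
      · simp at hp; subst hp; simp
    have hsort := sorted2_append_singleton l (pt, k, title)
    cases hs : PySem.List.sorted2 l (fun y => -y.1) (fun y => y.2.1) with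
    | nil =>
      rw [hs] at hmatch
      simp only [List.head?_nil] at hmatch
      refine ⟨l ++ [(pt, k, title)], k + 1, (some pt, String.ofList title),
        by simpa using hA, ?_, hbound', ?_⟩
      · rw [hB]; simp [hmatch]
      · unfold pvInv at *
        rw [hsort, hs]
        simp [PySem.List.insertBy]
    | cons y t =>
      rw [hs] at hmatch
      simp only [List.head?_cons] at hmatch
      have hy : y ∈ l := (PySem.List.sorted2_perm l (fun y => -y.1) (fun y => y.2.1) false).mem_iff.mp
        (by rw [hs]; simp)
      have hyk : y.2.1 < k := hbound y hy
      have hins : PySem.List.insertBy pvBefore (pt, k, title) (y :: t) =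
          if y.1 < pt then (pt, k, title) :: y :: t
          else y :: PySem.List.insertBy pvBefore (pt, k, title) t := by
        by_cases hlt : y.1 < pt
        · rw [if_pos hlt]
          have : pvBefore (pt, k, title) y = true := by simp [pvBefore]; omega
          simp [PySem.List.insertBy, this]
        · rw [if_neg hlt]
          have : pvBefore (pt, k, title) y = false := by
            simp [pvBefore]
            constructor
            · omega
            · intro _; omega
          simp [PySem.List.insertBy, this]
      by_cases hlt : y.1 < pt
      · refine ⟨l ++ [(pt, k, title)], k + 1, (some pt, String.ofList title),
          by simpa using hA, ?_, hbound', ?_⟩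
        · rw [hB]; simp [hmatch.1, hlt]
        · rw [hsort, hs, hins, if_pos hlt]
          simp
      · refine ⟨l ++ [(pt, k, title)], k + 1, st,
          by simpa using hA, ?_, hbound', ?_⟩
        · rw [hB]; simp [hmatch.1, hlt]
        · rw [hsort, hs, hins, if_neg hlt]
          simpa using hmatch

theorem fold_agree (mm : List Char) (infos : List String) (hok : ∀ i ∈ infos, pvInfoOK i = true) :
    ∀ (l : List (Int × Int × List Char)) (k : Int) (st : Option Int × String), pvInv l k st →
    ∃ l' k' st',
      infos.foldl (fun acc info => acc.bind (fun s => pvStepA mm s info)) (some (l, k)) = some (l', k') ∧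
      infos.foldl (fun acc info => acc.bind (fun s => pvStepB mm s info)) (some st) = some st' ∧
      pvInv l' k' st' := by
  induction infos with
  | nil => exact fun l k st hinv => ⟨l, k, st, rfl, rfl, hinv⟩
  | cons i t ih =>
    intro l k st hinv
    obtain ⟨l1, k1, st1, hA, hB, hinv1⟩ := inv_step mm i (hok i (by simp)) l k st hinv
    obtain ⟨l', k', st', hA', hB', hinv'⟩ := ih (fun j hj => hok j (by simp [hj])) l1 k1 st1 hinv1
    exact ⟨l', k', st', by simpa [hA] using hA', by simpa [hB] using hB', hinv'⟩

-- ===== VERDICT (by name: the statement is the Claim_ definition above) =====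
theorem solution_spec : Claim_equal_solution := by
  intro m musicinfos _ hpre
  unfold Spec_solution solution solution_alt
  rw [pvNormB_eq]
  obtain ⟨l', k', st', hA, hB, hinv⟩ :=
    fold_agree (pvReplA m.toList) musicinfos hpre [] 0 (none, "(None)")
      (by constructor <;> simp [PySem.List.sorted2])
  rw [hA, hB]
  dsimp only
  obtain ⟨hb, hmatch⟩ := hinv
  cases hs : (PySem.List.sorted2 l' (fun y => -y.1) (fun y => y.2.1)).head? with
  | none =>
    rw [hs] at hmatch
    simp only [List.head?_eq_none_iff] at hs
    simp [hs, hmatch]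
  | some x =>
    rw [hs] at hmatch
    cases hl : PySem.List.sorted2 l' (fun y => -y.1) (fun y => y.2.1) with
    | nil => simp [hl] at hs
    | cons y t =>
      rw [hl] at hs; simp at hs; subst hs
      simpa using hmatch.2.symm
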